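-- pv_equiv track=rewrite | github.com/zplus1209/MixupSegment | main_share_batch.py | filter_for_pair_requirement
-- ===== SOURCE A (Python) =====
-- def filter_for_pair_requirement(samples):
--     from collections import Counter, defaultdict
--     by_cls = defaultdict(list)
--     for i, s in enumerate(samples):
--         by_cls[int(s["label"])].append(i)
--     keep = set()
--     for c, idxs in by_cls.items():
--         if len(idxs) >= 2:
--             keep.update(idxs)
--     return [samples[i] for i in sorted(keep)]
-- ===== SOURCE B (Python) =====
-- def filter_for_pair_requirement(samples):
--     labs = [int(s["label"]) for s in samples]
--     return [s for i, s in enumerate(samples)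
--             if any(l == labs[i] for j, l in enumerate(labs) if j != i)]
-- ===== Notes on version B (the rewrite author's own statement) =====
-- stated objective: alternative
-- what changed: Replaces A's index-grouping dict, keep-set and sorted() gather with a direct pairwise existence test: keep a sample iff some other position carries the same label, in one filtering pass over the original list.
import Mathlib
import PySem

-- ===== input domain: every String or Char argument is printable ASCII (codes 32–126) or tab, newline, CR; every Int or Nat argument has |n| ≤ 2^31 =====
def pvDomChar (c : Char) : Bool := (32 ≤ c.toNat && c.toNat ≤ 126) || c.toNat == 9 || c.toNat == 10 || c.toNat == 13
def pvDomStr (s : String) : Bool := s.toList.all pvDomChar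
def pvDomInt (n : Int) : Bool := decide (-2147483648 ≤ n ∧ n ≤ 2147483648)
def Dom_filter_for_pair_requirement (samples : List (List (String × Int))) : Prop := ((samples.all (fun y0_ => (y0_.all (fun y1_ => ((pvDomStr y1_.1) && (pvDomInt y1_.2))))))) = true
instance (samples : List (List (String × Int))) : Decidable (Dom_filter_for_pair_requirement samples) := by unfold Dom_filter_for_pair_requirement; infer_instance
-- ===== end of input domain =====

-- B replaces A's index-grouping dict + keep-set + sorted() gather by a direct pairwise test:
-- keep a sample iff some OTHER position carries the same label (one filtering pass, no counting
-- structure); alternative decomposition, not claimed faster.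


-- ===== PORT A =====
-- int(s["label"]): the value is already an Int, so int() is the identity; Pre_ guarantees the
-- key "label" is present (Python raises KeyError otherwise), so .getD 0 is never the fallback.
def pvLabel (s : List (String × Int)) : Int :=
  ((PySem.Dict.mk s).get? "label").getD 0

def filter_for_pair_requirement (samples : List (List (String × Int))) : List (List (String × Int)) :=
  let by_cls : PySem.Dict Int (List Int) :=
    (PySem.List.enumerate samples).foldl
      (fun d p => d.modify (pvLabel p.2) [] (fun l => l ++ [p.1])) PySem.Dict.empty
  let keep : PySem.Set Int :=
    by_cls.items.foldl
      (fun k p => if 2 ≤ p.2.length then PySem.Set.update k p.2 else k) PySem.Set.empty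
  (PySem.List.sorted keep (fun x => x) false).filterMap (fun i => PySem.List.pyGet? samples i)

-- ===== PORT B =====
-- labs[i] with i from enumerate(samples) is always in range, so .getD 0 never falls back.
def filter_for_pair_requirement_alt (samples : List (List (String × Int))) : List (List (String × Int)) :=
  let labs : List Int := samples.map pvLabel
  ((PySem.List.enumerate samples).filter (fun p =>
      (PySem.List.enumerate labs).any (fun q =>
        decide (q.1 ≠ p.1) && (q.2 == (PySem.List.pyGet? labs p.1).getD 0)))).map (·.2)

-- ===== PRECONDITION & SPEC =====
-- Pre_ excludes exactly the samples missing the key "label", on which Python A raises KeyError.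
def Pre_filter_for_pair_requirement (samples : List (List (String × Int))) : Prop :=
  (samples.all (fun s => (PySem.Dict.mk s).contains "label")) = true
instance (samples : List (List (String × Int))) : Decidable (Pre_filter_for_pair_requirement samples) := by unfold Pre_filter_for_pair_requirement; infer_instance
def pvWitness_filter_for_pair_requirement : (List (List (String × Int))) :=
  [[("label", 1), ("x", 7)], [("label", 2)], [("label", 1)]]

def Spec_filter_for_pair_requirement (samples : List (List (String × Int))) (out : List (List (String × Int))) : Prop := out = filter_for_pair_requirement_alt samples
instance (samples : List (List (String × Int))) (out : List (List (String × Int))) : Decidable (Spec_filter_for_pair_requirement samples out) := by unfold Spec_filter_for_pair_requirement; infer_instance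

-- ===== CLAIM (what is proved, stated in full; the proofs are below) =====
def Claim_equal_filter_for_pair_requirement : Prop := ∀ (samples : List (List (String × Int))), Dom_filter_for_pair_requirement samples → Pre_filter_for_pair_requirement samples → Spec_filter_for_pair_requirement samples (filter_for_pair_requirement samples)

-- ===== LEMMAS AND PROOFS =====

-- A's keep-set loop: membership characterisation.
theorem mem_keep_foldl (items : List (Int × List Int)) (acc : PySem.Set Int) (i : Int) :
    i ∈ items.foldl (fun k p => if 2 ≤ p.2.length then PySem.Set.update k p.2 else k) acc ↔
      i ∈ acc ∨ ∃ p ∈ items, 2 ≤ p.2.length ∧ i ∈ p.2 := by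
  induction items generalizing acc with
  | nil => simp
  | cons p rest ih =>
    simp only [List.foldl_cons]
    by_cases h : 2 ≤ p.2.length
    · rw [if_pos h, ih, PySem.Set.mem_update]
      constructor
      · rintro ((hi | hi) | ⟨a, hm, hl, hib⟩)
        · exact Or.inl hi
        · exact Or.inr ⟨p, List.mem_cons_self, h, hi⟩
        · exact Or.inr ⟨a, List.mem_cons_of_mem _ hm, hl, hib⟩
      · rintro (hi | ⟨a, hm, hl, hib⟩)
        · exact Or.inl (Or.inl hi)
        · rcases List.mem_cons.mp hm with heq | hm'
          · subst heq; exact Or.inl (Or.inr hib)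
          · exact Or.inr ⟨a, hm', hl, hib⟩
    · rw [if_neg h, ih]
      constructor
      · rintro (hi | ⟨a, hm, hl, hib⟩)
        · exact Or.inl hi
        · exact Or.inr ⟨a, List.mem_cons_of_mem _ hm, hl, hib⟩
      · rintro (hi | ⟨a, hm, hl, hib⟩)
        · exact Or.inl hi
        · rcases List.mem_cons.mp hm with heq | hm'
          · subst heq; exact absurd hl h
          · exact Or.inr ⟨a, hm', hl, hib⟩

-- A's keep-set loop preserves Nodup (it is a genuine Python set).
theorem nodup_keep_foldl (items : List (Int × List Int)) (acc : PySem.Set Int)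
    (h : acc.Nodup) :
    (items.foldl (fun k p => if 2 ≤ p.2.length then PySem.Set.update k p.2 else k) acc).Nodup := by
  induction items generalizing acc with
  | nil => simpa
  | cons p rest ih =>
    simp only [List.foldl_cons]
    by_cases hp : 2 ≤ p.2.length
    · simp only [hp, if_true]
      exact ih _ (PySem.Set.nodup_update _ _ h)
    · simp only [hp, if_false]
      exact ih _ h

-- The gather step: picking xs[k] for the ascending k with p k = listing the elements with q.
theorem gather_filter (xs : List (List (String × Int))) (p : Nat → Bool)
    (q : List (String × Int) → Bool)
    (h : ∀ k (hk : k < xs.length), p k = q xs[k]) :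
    ((List.range xs.length).filter p).filterMap (fun k => xs[k]?) = xs.filter q := by
  induction xs using List.reverseRecOn with
  | nil => simp
  | append_singleton ys y ih =>
    have hlen : (ys ++ [y]).length = ys.length + 1 := by simp
    rw [hlen, List.range_succ, List.filter_append, List.filterMap_append, List.filter_append]
    have h1 : ∀ k (hk : k < ys.length), p k = q ys[k] := by
      intro k hk
      have := h k (by simp; omega)
      simpa [List.getElem_append_left hk] using this
    have h2 : p ys.length = q y := by
      have := h ys.length (by simp)
      simpa using this
    have hidx : ((List.range ys.length).filter p).filterMap (fun k => (ys ++ [y])[k]?) =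
        ((List.range ys.length).filter p).filterMap (fun k => ys[k]?) := by
      apply List.filterMap_congr
      intro k hk
      have hk' : k < ys.length := by
        have := List.mem_filter.mp hk
        exact List.mem_range.mp this.1
      rw [List.getElem?_append_left hk']
    rw [hidx, ih h1]
    by_cases hq : q y
    · simp [hq, h2]
    · simp [h2, hq]

-- A's value as the count-based filter over samples.
theorem filter_for_pair_requirement_eq_count (samples : List (List (String × Int))) :
    filter_for_pair_requirement samples
      = samples.filter (fun s => decide (2 ≤ (samples.map pvLabel).count (pvLabel s))) := by
  unfold filter_for_pair_requirement
  simp only []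
  set labels := samples.map pvLabel with hlabels
  set e := PySem.List.enumerate samples with he
  set by_cls := e.foldl (fun d p => d.modify (pvLabel p.2) [] (fun l => l ++ [p.1]))
      PySem.Dict.empty with hby
  have hgetD : ∀ c : Int, by_cls.getD c [] = ((e.filter (fun p => pvLabel p.2 == c)).map (·.1)) := by
    intro c
    have hfold : e.foldl (fun d p => d.modify (pvLabel p.2) [] (fun l => l ++ [p.1])) PySem.Dict.empty
        = (e.map (fun p => (pvLabel p.2, p.1))).foldl
          (fun d r => d.modify r.1 [] (fun l => l ++ [r.2])) PySem.Dict.empty := by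
      rw [List.foldl_map]
    rw [hby, hfold, PySem.Dict.getD_foldl_modify_append]
    simp [List.filter_map, List.map_map, Function.comp_def]
  have hnodup : by_cls.keys.Nodup :=
    PySem.Dict.nodup_keys_foldl_modify_key _ _ _ _ _ PySem.Dict.nodup_keys_empty
  have hkeys : by_cls.keys = PySem.Set.ofList labels := by
    rw [hby, PySem.Dict.keys_foldl_modify_key]
    rw [show (e.map (fun p => pvLabel p.2)) = labels from by
      rw [hlabels, show (fun p : Int × List (String × Int) => pvLabel p.2)
          = pvLabel ∘ (fun p : Int × List (String × Int) => p.2) from rfl,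
        ← List.map_map, he, PySem.List.map_snd_enumerate]]
    rw [show (PySem.Dict.empty : PySem.Dict Int (List Int)).keys = [] from rfl,
      PySem.Set.update_nil_left]
  have hmemG : ∀ (c i : Int), i ∈ ((e.filter (fun p => pvLabel p.2 == c)).map (·.1)) ↔
      ∃ (k : Nat) (hk : k < samples.length), pvLabel samples[k] = c ∧ i = (k : Int) := by
    intro c i
    simp only [he, List.mem_map, List.mem_filter, PySem.List.mem_enumerate_iff]
    constructor
    · rintro ⟨p, ⟨⟨k, hk, rfl⟩, hc⟩, rfl⟩
      exact ⟨k, hk, by simpa using hc, by simp⟩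
    · rintro ⟨k, hk, hc, rfl⟩
      exact ⟨((k : Int), samples[k]), ⟨⟨k, hk, by simp⟩, by simpa using hc⟩, rfl⟩
  have hlenG : ∀ c : Int, ((e.filter (fun p => pvLabel p.2 == c)).map (·.1)).length
      = labels.count c := by
    intro c
    rw [List.length_map]
    conv_rhs => rw [hlabels, ← PySem.List.map_snd_enumerate samples 0]
    rw [← List.countP_eq_length_filter, List.count, List.countP_map, List.countP_map, he]
    rfl
  have hkeep : ∀ i : Int,
      i ∈ by_cls.items.foldl (fun k p => if 2 ≤ p.2.length then PySem.Set.update k p.2 else k)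
        PySem.Set.empty ↔
      ∃ (k : Nat) (hk : k < samples.length), i = (k : Int) ∧
        2 ≤ labels.count (pvLabel samples[k]) := by
    intro i
    rw [mem_keep_foldl, PySem.Dict.items_eq_map_keys by_cls hnodup []]
    constructor
    · rintro (hi | ⟨p, hp, hl, hi⟩)
      · cases hi
      · obtain ⟨c, hc, rfl⟩ := List.mem_map.mp hp
        rw [hgetD c] at hl hi
        obtain ⟨k, hk, hck, rfl⟩ := (hmemG c i).mp hi
        refine ⟨k, hk, rfl, ?_⟩
        rw [hck, ← hlenG c]
        exact hl
    · rintro ⟨k, hk, rfl, hcount⟩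
      refine Or.inr ⟨(pvLabel samples[k], by_cls.getD (pvLabel samples[k]) []),
        List.mem_map.mpr ⟨pvLabel samples[k], ?_, rfl⟩, ?_, ?_⟩
      · rw [hkeys]
        exact (PySem.Set.mem_ofList _ _).mpr (by
          rw [hlabels]; exact List.mem_map.mpr ⟨samples[k], List.getElem_mem hk, rfl⟩)
      · rw [hgetD, hlenG]; exact hcount
      · rw [hgetD]
        exact (hmemG _ _).mpr ⟨k, hk, rfl, rfl⟩
  set n := samples.length with hn
  set p : Nat → Bool := fun k => decide (2 ≤ labels.count (labels.getD k 0)) with hp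
  set tgt := ((List.range n).filter p).map (fun k : Nat => (k : Int)) with htgt
  have hbridge : ∀ k (hk : k < n), labels.getD k 0 = pvLabel (samples[k]'hk) := by
    intro k hk
    have hk' : k < labels.length := by simp [hlabels]; omega
    rw [List.getD_eq_getElem _ _ hk']
    simp [hlabels]
  have hkeep_nodup : (by_cls.items.foldl
      (fun k p => if 2 ≤ p.2.length then PySem.Set.update k p.2 else k) PySem.Set.empty).Nodup :=
    nodup_keep_foldl _ _ (by simp [PySem.Set.empty])
  have htgt_nodup : tgt.Nodup := by
    refine List.Nodup.map (fun a b hab => by exact_mod_cast hab) ?_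
    exact (List.nodup_range).filter p
  have hperm : tgt.Perm (by_cls.items.foldl
      (fun k p => if 2 ≤ p.2.length then PySem.Set.update k p.2 else k) PySem.Set.empty) := by
    rw [List.perm_ext_iff_of_nodup htgt_nodup hkeep_nodup]
    intro i
    rw [hkeep i]
    simp only [htgt, List.mem_map, List.mem_filter, List.mem_range]
    constructor
    · rintro ⟨k, ⟨hk, hpk⟩, rfl⟩
      refine ⟨k, hk, rfl, ?_⟩
      have := of_decide_eq_true hpk
      rwa [hbridge k hk] at this
    · rintro ⟨k, hk, rfl, hcount⟩
      refine ⟨k, ⟨hk, ?_⟩, rfl⟩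
      rw [hp]
      simp only [decide_eq_true_eq]
      rwa [hbridge k hk]
  have hsorted : PySem.List.sorted (by_cls.items.foldl
      (fun k p => if 2 ≤ p.2.length then PySem.Set.update k p.2 else k) PySem.Set.empty)
      (fun x => x) false = tgt := by
    refine PySem.List.sorted_eq_of_perm_of_pairwise_lt _ _ _ hperm ?_
    refine List.Pairwise.map _ (fun a b hab => ?_) ((List.pairwise_lt_range).filter p)
    exact_mod_cast hab
  rw [hsorted, htgt, List.filterMap_map]
  have hq : ((List.range n).filter p).filterMap
        (fun k : Nat => PySem.List.pyGet? samples (k : Int))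
      = samples.filter (fun s => decide (2 ≤ labels.count (pvLabel s))) := by
    rw [show (fun k : Nat => PySem.List.pyGet? samples (k : Int))
        = (fun k : Nat => samples[k]?) from by
      funext k; exact PySem.List.pyGet?_natCast samples k]
    exact gather_filter samples p _ (by
      intro k hk
      rw [hp]
      simp only []
      rw [hbridge k hk])
  simp only [Function.comp_def]
  exact hq

-- Filtering enumerate by an index-dependent predicate that agrees pointwise with a value
-- predicate, then dropping the indices, is plain filtering.
theorem filter_enumerate_map {α : Type} (xs : List α) (P : Int × α → Bool) (q : α → Bool)
    (s : Int) (h : ∀ p ∈ PySem.List.enumerate xs s, P p = q p.2) :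
    ((PySem.List.enumerate xs s).filter P).map (·.2) = xs.filter q := by
  induction xs generalizing s with
  | nil => simp [PySem.List.enumerate_nil]
  | cons x rest ih =>
    rw [PySem.List.enumerate_cons]
    have hx := h (s, x) List.mem_cons_self
    have ht := ih (s + 1) (fun p hp => h p (List.mem_cons_of_mem _ hp))
    by_cases hq : q x
    · simp [hx, hq, ht]
    · simp [hx, hq, ht]

-- Pairwise existence ↔ count ≥ 2: a value at position k occurs at another position iff it
-- occurs at least twice in the list.
theorem exists_other_iff_two_le_count (l : List Int) (k : Nat) (hk : k < l.length) :
    (∃ (j : Nat) (hj : j < l.length), j ≠ k ∧ l[j] = l[k]) ↔ 2 ≤ l.count l[k] := by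
  obtain ⟨c, hc⟩ : ∃ c, l[k] = c := ⟨l[k], rfl⟩
  rw [hc]
  have hdecomp : l = l.take k ++ c :: l.drop (k + 1) := by
    conv_lhs => rw [← List.take_append_drop k l]
    rw [List.drop_eq_getElem_cons hk, hc]
  have hsplit : l.count c = (l.take k).count c + ((l.drop (k + 1)).count c + 1) := by
    conv_lhs => rw [hdecomp]
    rw [List.count_append, List.count_cons_self]
  constructor
  · rintro ⟨j, hj, hne, hval⟩
    rcases Nat.lt_or_ge j k with hlt | hge
    · have hjt : j < (l.take k).length := by simp; omega
      have hmem : c ∈ l.take k :=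
        List.mem_iff_getElem.mpr ⟨j, hjt, by rw [List.getElem_take]; exact hval⟩
      have h1 : 1 ≤ (l.take k).count c := List.one_le_count_iff.mpr hmem
      omega
    · have hjd : j - (k + 1) < (l.drop (k + 1)).length := by simp; omega
      have hmem : c ∈ l.drop (k + 1) :=
        List.mem_iff_getElem.mpr ⟨j - (k + 1), hjd, by
          rw [List.getElem_drop, ← hval]
          congr 1
          omega⟩
      have h1 : 1 ≤ (l.drop (k + 1)).count c := List.one_le_count_iff.mpr hmem
      omega
  · intro hcount
    rcases Nat.lt_or_ge 0 ((l.take k).count c) with hpos | hz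
    · obtain ⟨i, hi, hval⟩ := List.mem_iff_getElem.mp (List.one_le_count_iff.mp hpos)
      have hik : i < k := by simp at hi; omega
      refine ⟨i, by omega, by omega, ?_⟩
      rw [← List.getElem_take (h := hi)] at *
      exact hval
    · have hpos : 0 < (l.drop (k + 1)).count c := by omega
      obtain ⟨i, hi, hval⟩ := List.mem_iff_getElem.mp (List.one_le_count_iff.mp hpos)
      have hil : k + 1 + i < l.length := by simp at hi; omega
      refine ⟨k + 1 + i, hil, by omega, ?_⟩
      rw [← hval, List.getElem_drop]

-- B's value as the count-based filter over samples.
theorem filter_for_pair_requirement_alt_eq_count (samples : List (List (String × Int))) :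
    filter_for_pair_requirement_alt samples
      = samples.filter (fun s => decide (2 ≤ (samples.map pvLabel).count (pvLabel s))) := by
  unfold filter_for_pair_requirement_alt
  simp only []
  set labs := samples.map pvLabel with hlabs
  refine filter_enumerate_map samples _ _ 0 ?_
  intro p hp
  obtain ⟨k, hk, rfl⟩ := (PySem.List.mem_enumerate_iff _ _ _).mp hp
  have hkl : k < labs.length := by simpa [hlabs] using hk
  simp only [zero_add]
  have hget : (PySem.List.pyGet? labs ((k : Nat) : Int)).getD 0 = labs[k] := by
    rw [PySem.List.pyGet?_natCast, List.getElem?_eq_getElem hkl]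
    rfl
  have hlk : labs[k] = pvLabel samples[k] := by simp [hlabs]
  rw [hget, List.any_eq]
  refine decide_eq_decide.mpr ?_
  rw [← hlk, ← exists_other_iff_two_le_count labs k hkl]
  constructor
  · rintro ⟨q, hq, hcond⟩
    obtain ⟨j, hj, rfl⟩ := (PySem.List.mem_enumerate_iff _ _ _).mp hq
    simp only [Bool.and_eq_true, decide_eq_true_eq, beq_iff_eq, zero_add] at hcond
    exact ⟨j, hj, fun h => hcond.1 (by exact_mod_cast h), hcond.2⟩
  · rintro ⟨j, hj, hne, hval⟩
    refine ⟨(((j : Nat) : Int), labs[j]),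
      (PySem.List.mem_enumerate_iff _ _ _).mpr ⟨j, hj, by simp⟩, ?_⟩
    simp only [Bool.and_eq_true, decide_eq_true_eq, beq_iff_eq]
    exact ⟨fun h => hne (by exact_mod_cast h), hval⟩

-- ===== VERDICT (by name: the statement is the Claim_ definition above) =====
theorem filter_for_pair_requirement_spec : Claim_equal_filter_for_pair_requirement := by
  intro samples _ _
  unfold Spec_filter_for_pair_requirement
  rw [filter_for_pair_requirement_eq_count, filter_for_pair_requirement_alt_eq_count]
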